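-- pv_equiv track=rewrite | github.com/hmkyriacou/hangmanProject | blank_Maker.py | dashMaker
-- ===== SOURCE A (Python) =====
-- def dashMaker(word,letter):
--   blanks = ""
--   c = 0
--   for blankMaker in range(len(word)):
--       for letterCounter in range(len(word)):
--           wordPs = input1.find(letter)
--           if wordPs == c:
--               blanks+= letter
--           else:
--               blanks += "-"
--
--       c+=1
--
--   return blanks
--
-- input1 = "HELOLLO"
-- ===== SOURCE B (Python) =====
-- input1 = "HELOLLO"
--
-- def dashMaker(word, letter):
--     n = len(word)
--     p = input1.find(letter)
--     if 0 <= p < n: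
--         return "-" * (n * p) + letter * n + "-" * (n * (n - 1 - p))
--     return "-" * (n * n)
-- ===== Notes on version B (the rewrite author's own statement) =====
-- stated objective: faster
-- what changed: Replaces the nested character-by-character loops (with input1.find recomputed every inner iteration) by one hoisted find and a closed-form concatenation of three string-multiplication blocks.
import Mathlib
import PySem

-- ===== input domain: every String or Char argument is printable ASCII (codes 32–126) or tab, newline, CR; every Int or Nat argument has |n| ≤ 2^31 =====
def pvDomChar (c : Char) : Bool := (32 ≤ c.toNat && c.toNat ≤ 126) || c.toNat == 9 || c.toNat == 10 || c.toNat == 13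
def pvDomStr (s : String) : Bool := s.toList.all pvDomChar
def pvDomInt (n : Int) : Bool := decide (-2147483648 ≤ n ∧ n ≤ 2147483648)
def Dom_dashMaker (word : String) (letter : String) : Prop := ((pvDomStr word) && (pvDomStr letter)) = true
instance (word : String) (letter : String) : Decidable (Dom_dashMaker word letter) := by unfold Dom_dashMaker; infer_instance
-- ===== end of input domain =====

-- B hoists the loop-invariant input1.find(letter) and builds the result as three
-- string-multiplication blocks instead of A's nested character-by-character loops (objective: faster).

def input1 : String := "HELOLLO"

-- ===== PORT A =====
-- Strings are handled as their character lists; '+=' is list append.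
def dashMaker (word : String) (letter : String) : String :=
  let st := (PySem.List.pyRange 0 (PySem.Str.len word) 1).foldl
    (fun (st : List Char × Int) _blankMaker =>
      let blanks := (PySem.List.pyRange 0 (PySem.Str.len word) 1).foldl
        (fun blanks _letterCounter =>
          let wordPs := PySem.Str.find input1 letter
          if wordPs == st.2 then blanks ++ letter.toList else blanks ++ ['-'])
        st.1
      (blanks, st.2 + 1))
    (([] : List Char), (0 : Int))
  String.ofList st.1

-- ===== PORT B =====
-- Python string multiplication s * k is PySem.List.pyRepeat on the character list.
def dashMaker_alt (word : String) (letter : String) : String :=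
  let n : Int := PySem.Str.len word
  let p : Int := PySem.Str.find input1 letter
  if 0 ≤ p ∧ p < n then
    String.ofList (PySem.List.pyRepeat ['-'] (n * p) ++ PySem.List.pyRepeat letter.toList n
               ++ PySem.List.pyRepeat ['-'] (n * (n - 1 - p)))
  else
    String.ofList (PySem.List.pyRepeat ['-'] (n * n))

-- ===== PRECONDITION & SPEC =====
def Spec_dashMaker (word : String) (letter : String) (out : String) : Prop := out = dashMaker_alt word letter
instance (word : String) (letter : String) (out : String) : Decidable (Spec_dashMaker word letter out) := by unfold Spec_dashMaker; infer_instance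

-- ===== CLAIM (what is proved, stated in full; the proofs are below) =====
def Claim_equal_dashMaker : Prop := ∀ (word : String) (letter : String), Dom_dashMaker word letter → Spec_dashMaker word letter (dashMaker word letter)

-- ===== LEMMAS AND PROOFS =====

-- One outer-loop row: n copies of `letter` if the hoisted find equals the row index c, else n dashes.
def pvRow (p c : Int) (L : List Char) (n : Nat) : List Char :=
  (List.replicate n (if p == c then L else ['-'])).flatten

lemma pv_inner (l : List Int) (p c : Int) (L b : List Char) :
    l.foldl (fun blanks (_ : Int) => if p == c then blanks ++ L else blanks ++ ['-']) b
      = b ++ pvRow p c L l.length := by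
  induction l generalizing b with
  | nil => simp [pvRow]
  | cons x t ih =>
    rw [List.foldl_cons, ih]
    by_cases h : p = c <;> simp [pvRow, List.replicate_succ, h, List.append_assoc]

lemma pv_outer (l : List Int) (p : Int) (L : List Char) (m : Nat) (b : List Char) (c : Int) :
    l.foldl (fun (st : List Char × Int) (_ : Int) => (st.1 ++ pvRow p st.2 L m, st.2 + 1)) (b, c)
      = (b ++ ((PySem.List.pyRange c (c + l.length) 1).map
            (fun c' => pvRow p c' L m)).flatten, c + l.length) := by
  induction l generalizing b c with
  | nil => simp [PySem.List.pyRange_one_eq_nil]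
  | cons x t ih =>
    rw [List.foldl_cons, ih]
    rw [show c + ((x :: t).length : Int) = (c + 1) + (t.length : Int) by simp; ring]
    rw [PySem.List.pyRange_one_cons (by omega : c < (c + 1) + (t.length : Int))]
    simp [List.append_assoc]

lemma pv_row_dash (p c : Int) (h : ¬ p = c) (L : List Char) (n : Nat) :
    pvRow p c L n = List.replicate n '-' := by
  simp [pvRow, h, List.flatten_replicate_singleton]

lemma pv_dash_block (l : List Int) (p : Int) (h : ∀ x ∈ l, ¬ p = x) (L : List Char) (n : Nat) :
    (l.map (fun c' => pvRow p c' L n)).flatten = List.replicate (l.length * n) '-' := by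
  induction l with
  | nil => simp
  | cons x t ih =>
    simp only [List.map_cons, List.flatten_cons, List.length_cons]
    rw [pv_row_dash p x (h x (by simp)) L n, ih (fun y hy => h y (by simp [hy]))]
    rw [Nat.succ_mul, Nat.add_comm, List.replicate_add]

lemma pv_dashMaker_rows (word letter : String) :
    dashMaker word letter
      = String.ofList (((PySem.List.pyRange 0 (word.toList.length : Int) 1).map
          (fun c' => pvRow (PySem.Str.find input1 letter) c' letter.toList
            word.toList.length)).flatten) := by
  simp only [dashMaker, PySem.Str.len_eq, pv_inner]
  rw [pv_outer]
  simp

-- ===== VERDICT (by name: the statement is the Claim_ definition above) =====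
theorem dashMaker_spec : Claim_equal_dashMaker := by
  intro word letter _
  unfold Spec_dashMaker dashMaker_alt
  rw [pv_dashMaker_rows]
  simp only [PySem.Str.len_eq]
  set p := PySem.Str.find input1 letter with hp
  set N : Nat := word.toList.length with hN
  by_cases hcase : 0 ≤ p ∧ p < (N : Int)
  · rw [if_pos hcase]
    obtain ⟨h0, h1⟩ := hcase
    obtain ⟨q, hq⟩ : ∃ q : Nat, p = (q : Int) := ⟨p.toNat, by omega⟩
    have hqN : q < N := by omega
    rw [hq]
    -- split the row range at p and p + 1
    rw [PySem.List.pyRange_one_append 0 (q : Int) ((N : Int)) (by omega) (by omega),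
        PySem.List.pyRange_one_append (q : Int) ((q : Int) + 1) ((N : Int)) (by omega) (by omega),
        PySem.List.pyRange_one_singleton]
    simp only [List.map_append, List.flatten_append, List.map_cons, List.map_nil,
      List.flatten_cons, List.flatten_nil, List.append_nil]
    rw [pv_dash_block _ _ (by intro x hx; rw [PySem.List.mem_pyRange_one] at hx; omega),
        pv_dash_block _ _ (by intro x hx; rw [PySem.List.mem_pyRange_one] at hx; omega)]
    simp only [PySem.List.length_pyRange_one]
    rw [show pvRow (q : Int) (q : Int) letter.toList N = (List.replicate N letter.toList).flatten by
      simp [pvRow]]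
    simp only [PySem.List.pyRepeat]
    rw [show ((q : Int) - 0).toNat = q by omega,
        show ((N : Int)).toNat = N by omega,
        show ((N : Int) * (q : Int)).toNat = N * q by rw [← Nat.cast_mul, Int.toNat_natCast],
        show ((N : Int) - ((q : Int) + 1)).toNat = N - 1 - q by omega,
        show ((N : Int) * ((N : Int) - 1 - (q : Int))).toNat = N * (N - 1 - q) by
          rw [show ((N : Int) - 1 - (q : Int)) = ((N - 1 - q : Nat) : Int) by omega,
              ← Nat.cast_mul, Int.toNat_natCast]]
    rw [Nat.mul_comm q N, Nat.mul_comm (N - 1 - q) N]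
    simp [List.append_assoc]
  · rw [if_neg hcase]
    rw [pv_dash_block _ _ (by intro x hx; rw [PySem.List.mem_pyRange_one] at hx; omega)]
    simp only [PySem.List.length_pyRange_one, PySem.List.pyRepeat_singleton]
    rw [show ((N : Int) - 0).toNat = N by omega,
        show ((N : Int) * (N : Int)).toNat = N * N by rw [← Nat.cast_mul, Int.toNat_natCast]]
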